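-- pv_equiv track=rewrite | github.com/volcengine/verl | atropos/environments/intern_bootcamp/internbootcamp_lib/internbootcamp/libs/calcudoku/calcudoku_generator.py | _generate_group_labels
-- ===== SOURCE A (Python) =====
-- def _generate_group_labels(count):
--     """
--     Returns a list of group labels (strings) of at least 'count' distinct labels.
--     For n up to 26, you can just use single letters A..Z.
--     If you might need more, generate double letters, triple letters, etc.
--     """
--     labels = []
--     # build single letters first
--     for ch in range(ord('A'), ord('Z')+1):
--         labels.append(chr(ch))
--     # then double letters if needed
--     if len(labels) < count:
--         for ch1 in range(ord('A'), ord('Z')+1):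
--             for ch2 in range(ord('A'), ord('Z')+1):
--                 labels.append(chr(ch1)+chr(ch2))
--                 if len(labels) >= count:
--                     break
--             if len(labels) >= count:
--                 break
--     return labels[:count]
-- ===== SOURCE B (Python) =====
-- def _generate_group_labels(count):
--     """
--     Returns a list of group labels (strings) of at least 'count' distinct labels.
--     Computes each label directly from its 0-based index with base-26 arithmetic.
--     """
--     n = max(26, min(count, 702))
--     labels = []
--     for i in range(n):
--         if i < 26:
--             labels.append(chr(65 + i))
--         else:
--             j = i - 26
--             labels.append(chr(65 + j // 26) + chr(65 + j % 26))
--     return labels[:count]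
-- ===== Notes on version B (the rewrite author's own statement) =====
-- stated objective: simpler
-- what changed: Replaces the separate single-letter pass and the nested double-letter loops with break bookkeeping by one flat loop that computes each label from its index by base-26 arithmetic (n = max(26, min(count, 702)) labels, then slice).
import Mathlib
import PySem

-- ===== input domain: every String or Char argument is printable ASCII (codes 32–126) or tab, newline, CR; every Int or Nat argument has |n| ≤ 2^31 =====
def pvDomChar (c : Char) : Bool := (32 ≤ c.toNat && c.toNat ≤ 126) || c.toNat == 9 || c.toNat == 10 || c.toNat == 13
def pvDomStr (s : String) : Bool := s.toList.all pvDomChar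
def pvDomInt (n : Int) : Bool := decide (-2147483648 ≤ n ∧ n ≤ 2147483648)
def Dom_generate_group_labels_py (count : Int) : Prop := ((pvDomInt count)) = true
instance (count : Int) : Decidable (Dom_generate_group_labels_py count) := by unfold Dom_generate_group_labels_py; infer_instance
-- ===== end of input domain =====

-- B changes only structure (one flat index→label loop instead of nested character loops); return value proved equal for every count.

-- ===== PORT A =====
-- chr(ch) for ASCII codes (exact on the 65..90 codes A uses)
def pvChr (ch : Int) : String := String.ofList [Char.ofNat ch.toNat]

-- inner 'for ch2 in range(...)' loop with its 'break' (append, then test len >= count)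
def pvAInner (count ch1 : Int) : List Int → List String → List String
  | [], labels => labels
  | ch2 :: rest, labels =>
      -- chr(ch1)+chr(ch2): concatenation of the two one-char strings, built as a two-char string
      let labels' := labels ++ [String.ofList [Char.ofNat ch1.toNat, Char.ofNat ch2.toNat]]
      if count ≤ (labels'.length : Int) then labels' else pvAInner count ch1 rest labels'

-- outer 'for ch1 in range(...)' loop with its 'break'
def pvAOuter (count : Int) : List Int → List String → List String
  | [], labels => labels
  | ch1 :: rest, labels =>
      let labels' := pvAInner count ch1 (PySem.List.pyRange 65 91 1) labels
      if count ≤ (labels'.length : Int) then labels' else pvAOuter count rest labels'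

def generate_group_labels_py (count : Int) : List String :=
  let labels := (PySem.List.pyRange 65 91 1).map pvChr
  let labels := if (labels.length : Int) < count then
      pvAOuter count (PySem.List.pyRange 65 91 1) labels
    else labels
  PySem.List.slice labels none (some count)

-- ===== PORT B =====
def pvBLabel (i : Int) : String :=
  if i < 26 then String.ofList [Char.ofNat (65 + i).toNat]
  else
    let j := i - 26
    String.ofList [Char.ofNat (65 + PySem.Int.floordiv j 26).toNat,
               Char.ofNat (65 + PySem.Int.mod j 26).toNat]

def generate_group_labels_py_alt (count : Int) : List String :=
  let n := max 26 (min count 702)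
  let labels := (PySem.List.pyRange 0 n 1).map pvBLabel
  PySem.List.slice labels none (some count)

-- ===== PRECONDITION & SPEC =====
def Spec_generate_group_labels_py (count : Int) (out : List String) : Prop := out = generate_group_labels_py_alt count
instance (count : Int) (out : List String) : Decidable (Spec_generate_group_labels_py count out) := by unfold Spec_generate_group_labels_py; infer_instance

-- ===== CLAIM (what is proved, stated in full; the proofs are below) =====
def Claim_equal_generate_group_labels_py : Prop := ∀ (count : Int), Dom_generate_group_labels_py count → Spec_generate_group_labels_py count (generate_group_labels_py count)

-- ===== LEMMAS AND PROOFS =====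

def pvF2 (p : Int × Int) : String := String.ofList [Char.ofNat p.1.toNat, Char.ofNat p.2.toNat]

def pvPairs : List (Int × Int) :=
  (PySem.List.pyRange 65 91 1).flatMap (fun a => (PySem.List.pyRange 65 91 1).map (fun b => (a, b)))

theorem pvAInner_char (count ch1 : Int) (l : List Int) (labels : List String)
    (h : (labels.length : Int) < count) :
    pvAInner count ch1 l labels =
      labels ++ (l.take (count - labels.length).toNat).map
        (fun ch2 => String.ofList [Char.ofNat ch1.toNat, Char.ofNat ch2.toNat]) := by
  induction l generalizing labels with
  | nil => simp [pvAInner]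
  | cons ch2 rest ih =>
    rw [pvAInner]
    have hlen : (((labels ++ [String.ofList [Char.ofNat ch1.toNat, Char.ofNat ch2.toNat]]).length : Int))
        = (labels.length : Int) + 1 := by simp
    have hm : (count - (labels.length : Int)).toNat
        = (count - ((labels.length : Int) + 1)).toNat + 1 := by omega
    by_cases hb : count ≤ (labels.length : Int) + 1
    · rw [if_pos (by rw [hlen]; exact hb)]
      have h1 : (count - (labels.length : Int)).toNat = 1 := by omega
      rw [h1]
      simp
    · rw [if_neg (by rw [hlen]; exact hb)]
      rw [ih _ (by rw [hlen]; omega)]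
      rw [hlen, hm, List.take_succ_cons]
      simp

theorem pvAOuter_char (count : Int) (l : List Int) (labels : List String)
    (h : (labels.length : Int) < count) :
    pvAOuter count l labels =
      labels ++ ((l.flatMap (fun a => (PySem.List.pyRange 65 91 1).map (fun b => (a, b)))).take
          (count - labels.length).toNat).map pvF2 := by
  induction l generalizing labels with
  | nil => simp [pvAOuter]
  | cons ch1 rest ih =>
    rw [pvAOuter]
    rw [pvAInner_char count ch1 _ labels h]
    have hR : (PySem.List.pyRange 65 91 1).length = 26 := by decide
    have hmap : ∀ k : Nat,
        ((PySem.List.pyRange 65 91 1).take k).map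
            (fun ch2 => String.ofList [Char.ofNat ch1.toNat, Char.ofNat ch2.toNat])
          = ((((PySem.List.pyRange 65 91 1).map (fun b => (ch1, b))).take k).map pvF2) := by
      intro k
      rw [← List.map_take, List.map_map]
      rfl
    by_cases hc : count ≤ (labels.length : Int) + 26
    case pos =>
      have hk : (count - (labels.length : Int)).toNat ≤ 26 := by omega
      have hlen' : ((labels ++ ((PySem.List.pyRange 65 91 1).take
            (count - (labels.length : Int)).toNat).map
            (fun ch2 => String.ofList [Char.ofNat ch1.toNat, Char.ofNat ch2.toNat])).length : Int)
          = (labels.length : Int) + (count - (labels.length : Int)).toNat := by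
        simp [List.length_take, hR]
        omega
      rw [if_pos (by rw [hlen']; omega)]
      rw [List.flatMap_cons]
      rw [List.take_append_of_le_length (by simp [hR]; omega)]
      rw [hmap]
    case neg =>
      have htk : (PySem.List.pyRange 65 91 1).take (count - (labels.length : Int)).toNat
          = PySem.List.pyRange 65 91 1 := List.take_of_length_le (by omega)
      rw [htk]
      have hlen' : ((labels ++ (PySem.List.pyRange 65 91 1).map
            (fun ch2 => String.ofList [Char.ofNat ch1.toNat, Char.ofNat ch2.toNat])).length : Int)
          = (labels.length : Int) + 26 := by simp [hR]
      rw [if_neg (by rw [hlen']; omega)]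
      rw [ih _ (by rw [hlen']; omega)]
      rw [hlen']
      rw [List.flatMap_cons]
      have h26 : ((PySem.List.pyRange 65 91 1).map (fun b => (ch1, b))).length = 26 := by
        simp [hR]
      have hsplit : (count - (labels.length : Int)).toNat
          = ((PySem.List.pyRange 65 91 1).map (fun b => (ch1, b))).length
            + (count - ((labels.length : Int) + 26)).toNat := by
        rw [h26]
        omega
      rw [hsplit]
      rw [List.take_length_add_append]
      have hm2 := hmap 26
      rw [List.take_of_length_le (le_of_eq hR)] at hm2
      rw [List.take_of_length_le (le_of_eq h26)] at hm2
      rw [hm2]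
      simp [List.append_assoc]

set_option maxRecDepth 10000 in
theorem pv_full702 :
    (PySem.List.pyRange 65 91 1).map pvChr ++ pvPairs.map pvF2
      = (List.range 702).map (fun k : Nat => pvBLabel (k : Int)) := by
  decide

set_option maxRecDepth 10000 in
theorem pv_labels_eq (count : Int) :
    (if ((((PySem.List.pyRange 65 91 1).map pvChr).length : Int) < count) then
        pvAOuter count (PySem.List.pyRange 65 91 1) ((PySem.List.pyRange 65 91 1).map pvChr)
      else (PySem.List.pyRange 65 91 1).map pvChr)
    = (PySem.List.pyRange 0 (max 26 (min count 702)) 1).map pvBLabel := by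
  have hR : (((PySem.List.pyRange 65 91 1).map pvChr).length : Int) = 26 := by decide
  by_cases h26 : count ≤ 26
  · rw [if_neg (by omega), show max 26 (min count 702) = 26 by omega]
    decide
  · rw [if_pos (by omega)]
    rw [pvAOuter_char count _ _ (by omega), hR]
    rw [show max 26 (min count 702) = min count 702 by omega]
    set k : Nat := min (count - 26).toNat 676 with hkdef
    rw [PySem.List.pyRange_one 0 (min count 702),
        show (min count 702 - 0).toNat = 26 + k by omega,
        List.map_map]
    rw [List.map_congr_left (l := List.range (26 + k))
        (f := pvBLabel ∘ fun j : Nat => (0 : Int) + (j : Int))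
        (g := fun j : Nat => pvBLabel (j : Int)) (fun a _ => by simp)]
    rw [show List.range (26 + k) = (List.range 702).take (26 + k) by
          rw [List.take_range]; congr 1; omega]
    conv_rhs => rw [List.map_take, ← pv_full702]
    have h26' : ((PySem.List.pyRange 65 91 1).map pvChr).length = 26 := by decide
    rw [show 26 + k = ((PySem.List.pyRange 65 91 1).map pvChr).length + k by rw [h26']]
    rw [List.take_length_add_append]
    congr 1
    rw [List.map_take]
    show (pvPairs.map pvF2).take (count - 26).toNat = (pvPairs.map pvF2).take k
    rw [List.take_eq_take_min, show (pvPairs.map pvF2).length = 676 from by decide, ← hkdef]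

-- ===== VERDICT (by name: the statement is the Claim_ definition above) =====
theorem generate_group_labels_py_spec : Claim_equal_generate_group_labels_py := by
  intro count _
  unfold Spec_generate_group_labels_py generate_group_labels_py generate_group_labels_py_alt
  simp only []
  rw [pv_labels_eq count]
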